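-- pv_equiv track=rewrite | github.com/scottrogowski/code2flow | lib/engine.py | _print_source
-- ===== SOURCE A (Python) =====
-- import collections
--
-- def _print_source(source_string, char_to_line_map):
--     lines = collections.defaultdict(str)
--     for char_pos, line_number in char_to_line_map.items():
--         lines[line_number] += source_string[char_pos]
--     ret = ''
--     for line_number, char in sorted(lines.items()):
--         ret += f'{line_number}: {char}'
--     return ret
-- ===== SOURCE B (Python) =====
-- def _print_source(source_string, char_to_line_map):
--     line_numbers = sorted(set(char_to_line_map.values()))
--     return ''.join(
--         f'{line_number}: ' + ''.join(
--             source_string[char_pos]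
--             for char_pos, ln in char_to_line_map.items() if ln == line_number)
--         for line_number in line_numbers)
-- ===== Notes on version B (the rewrite author's own statement) =====
-- stated objective: simpler
-- what changed: Replaces A's defaultdict grouping followed by sorting the dict's items with a direct comprehension: sort the distinct line numbers once, then build each line by one filter pass over the map, joining everything with ''.join.
import Mathlib
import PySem

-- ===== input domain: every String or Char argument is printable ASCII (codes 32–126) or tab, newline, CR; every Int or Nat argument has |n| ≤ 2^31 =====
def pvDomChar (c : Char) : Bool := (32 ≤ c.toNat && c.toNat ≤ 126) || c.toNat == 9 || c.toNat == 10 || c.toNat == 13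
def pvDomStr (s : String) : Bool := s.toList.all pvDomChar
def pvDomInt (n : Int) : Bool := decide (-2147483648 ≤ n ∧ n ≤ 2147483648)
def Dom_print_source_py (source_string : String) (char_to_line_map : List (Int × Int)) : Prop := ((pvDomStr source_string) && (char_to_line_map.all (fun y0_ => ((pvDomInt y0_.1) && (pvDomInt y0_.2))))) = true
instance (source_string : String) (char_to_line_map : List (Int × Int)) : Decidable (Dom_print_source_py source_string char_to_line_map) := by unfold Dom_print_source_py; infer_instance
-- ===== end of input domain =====

-- B replaces A's defaultdict-grouping-then-sort-items by 'sorted distinct line numbers, then one filter pass per line' (simpler decomposition, not faster).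

-- ===== PORT A =====
-- Strings are ported on the List Char side (PySem.Chars convention). source_string[char_pos] is
-- PySem.List.pyGetD (exact under Pre_, which demands every index in range). sorted(lines.items())
-- compares (int, str) tuples; the dict's keys are distinct, so sorting by the first component is exact.
def print_source_py (source_string : String) (char_to_line_map : List (Int × Int)) : String :=
  let src := source_string.toList
  let lines : PySem.Dict Int (List Char) :=
    char_to_line_map.foldl
      (fun d p => d.modify p.2 [] (fun s => s ++ [PySem.List.pyGetD src p.1 ' '])) PySem.Dict.empty
  let ret : List Char :=
    (PySem.List.sorted lines.items (fun q => q.1) false).foldl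
      (fun acc q => acc ++ (PySem.Int.toChars q.1 ++ (':' :: ' ' :: q.2))) []
  String.mk ret

-- ===== PORT B =====
-- sorted(set(values)) is sorted over PySem.Set.ofList; ''.join of one-char strings is flatten of singletons.
def print_source_py_alt (source_string : String) (char_to_line_map : List (Int × Int)) : String :=
  let src := source_string.toList
  let line_numbers :=
    PySem.List.sorted (PySem.Set.ofList (char_to_line_map.map (fun p => p.2))) (fun x => x) false
  String.mk
    ((line_numbers.map (fun ln =>
        PySem.Int.toChars ln ++ (':' :: ' ' ::
          ((char_to_line_map.filter (fun p => p.2 == ln)).map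
            (fun p => [PySem.List.pyGetD src p.1 ' '])).flatten))).flatten)

-- ===== PRECONDITION & SPEC =====
-- Pre_ excludes exactly the inputs where Python A raises IndexError: some char_pos out of range of source_string.
def Pre_print_source_py (source_string : String) (char_to_line_map : List (Int × Int)) : Prop :=
  ∀ p ∈ char_to_line_map, PySem.Raise.InRange source_string.toList.length p.1
instance (source_string : String) (char_to_line_map : List (Int × Int)) : Decidable (Pre_print_source_py source_string char_to_line_map) := by unfold Pre_print_source_py; infer_instance
def pvWitness_print_source_py : String × (List (Int × Int)) := ("ab", [(0, 2), (1, 1), (-1, 1)])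

def Spec_print_source_py (source_string : String) (char_to_line_map : List (Int × Int)) (out : String) : Prop := out = print_source_py_alt source_string char_to_line_map
instance (source_string : String) (char_to_line_map : List (Int × Int)) (out : String) : Decidable (Spec_print_source_py source_string char_to_line_map out) := by unfold Spec_print_source_py; infer_instance

-- ===== CLAIM (what is proved, stated in full; the proofs are below) =====
def Claim_equal_print_source_py : Prop := ∀ (source_string : String) (char_to_line_map : List (Int × Int)), Dom_print_source_py source_string char_to_line_map → Pre_print_source_py source_string char_to_line_map → Spec_print_source_py source_string char_to_line_map (print_source_py source_string char_to_line_map)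

-- ===== LEMMAS AND PROOFS =====

-- flatten of singleton blocks is map
theorem pv_flatten_singletons {α β : Type} (f : α → β) (l : List α) :
    (l.map (fun x => [f x])).flatten = l.map f := by
  induction l with
  | nil => rfl
  | cons x t ih => simp [ih]

-- the grouping fold: value at key ℓ is the chars of the entries with line number ℓ, in order
theorem pv_getD_fold {src : List Char} (m : List (Int × Int)) (ℓ : Int) :
    (m.foldl (fun d p => d.modify p.2 []
        (fun s => s ++ [PySem.List.pyGetD src p.1 ' '])) PySem.Dict.empty).getD ℓ []
      = (m.filter (fun p => p.2 == ℓ)).map (fun p => PySem.List.pyGetD src p.1 ' ') := by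
  have h : m.foldl (fun d p => d.modify p.2 []
        (fun s => s ++ [PySem.List.pyGetD src p.1 ' '])) PySem.Dict.empty
      = (m.map (fun p => (p.2, PySem.List.pyGetD src p.1 ' '))).foldl
          (fun d q => d.modify q.1 [] (fun s => s ++ [q.2])) PySem.Dict.empty := by
    rw [List.foldl_map]
  rw [h, PySem.Dict.getD_foldl_modify_append, PySem.Dict.getD_empty]
  rw [List.filter_map, List.map_map]
  rfl

theorem pv_main (source_string : String) (char_to_line_map : List (Int × Int)) :
    print_source_py source_string char_to_line_map
      = print_source_py_alt source_string char_to_line_map := by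
  dsimp only [print_source_py, print_source_py_alt]
  set src := source_string.toList with hsrc
  set m := char_to_line_map with hm
  set ch : Int × Int → Char := fun p => PySem.List.pyGetD src p.1 ' ' with hch
  set g : Int → List Char := fun ℓ => (m.filter (fun p => p.2 == ℓ)).map ch with hg
  set K := PySem.Set.ofList (m.map (fun p => p.2)) with hK
  set Ks := PySem.List.sorted K (fun x => x) false with hKs
  set d := m.foldl (fun d p => d.modify p.2 [] (fun s => s ++ [ch p])) PySem.Dict.empty with hd
  have hnodup : d.keys.Nodup := by
    rw [hd]
    exact PySem.Dict.nodup_keys_foldl_modify_key m (fun p => p.2) [] _ _ PySem.Dict.nodup_keys_empty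
  have hkeys : d.keys = K := by
    rw [hd, PySem.Dict.keys_foldl_modify_key, PySem.Dict.keys_empty, hK]
    rfl
  have hitems : d.items = K.map (fun ℓ => (ℓ, g ℓ)) := by
    rw [PySem.Dict.items_eq_map_keys d hnodup [], hkeys]
    apply List.map_congr_left
    intro ℓ _
    have := pv_getD_fold (src := src) m ℓ
    rw [hd, hch]
    simp only at this ⊢
    rw [this, hg]
  have hsorted : PySem.List.sorted d.items (fun q => q.1) false = Ks.map (fun ℓ => (ℓ, g ℓ)) := by
    apply PySem.List.sorted_eq_of_perm_of_pairwise_lt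
    · rw [hitems]
      exact (PySem.List.sorted_perm K (fun x => x) false).map _
    · have hpw : Ks.Pairwise (· < ·) := PySem.List.sorted_ofList_pairwise_lt (m.map (fun p => p.2))
      exact List.Pairwise.map _ (fun a b hab => hab) hpw
  rw [hsorted, PySem.List.foldl_append_eq_flatMap, List.nil_append, List.flatMap_map]
  congr 1
  rw [List.flatMap_def]
  apply congrArg
  apply List.map_congr_left
  intro ℓ _
  rw [pv_flatten_singletons]

-- ===== VERDICT (by name: the statement is the Claim_ definition above) =====
theorem print_source_py_spec : Claim_equal_print_source_py := by
  intro source_string char_to_line_map _ _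
  unfold Spec_print_source_py
  exact pv_main source_string char_to_line_map
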